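-- pv_equiv track=rewrite | github.com/jacoboforero/FPGA_Design_Agent | orchestrator/preplan_validator.py | _is_wrapped_by_parens
-- ===== SOURCE A (Python) =====
-- def _is_wrapped_by_parens(text: str) -> bool:
--     if len(text) < 2 or text[0] != "(" or text[-1] != ")":
--         return False
--     depth = 0
--     for idx, ch in enumerate(text):
--         if ch == "(":
--             depth += 1
--         elif ch == ")":
--             depth -= 1
--             if depth < 0:
--                 return False
--         if depth == 0 and idx < len(text) - 1:
--             return False
--     return depth == 0
-- ===== SOURCE B (Python) =====
-- def _is_wrapped_by_parens(text: str) -> bool: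
--     if len(text) < 2 or text[0] != "(" or text[-1] != ")":
--         return False
--     depths = []
--     depth = 0
--     for ch in text:
--         if ch == "(":
--             depth += 1
--         elif ch == ")":
--             depth -= 1
--         depths.append(depth)
--     return depths[-1] == 0 and min(depths[:-1]) >= 1
-- ===== Notes on version B (the rewrite author's own statement) =====
-- stated objective: alternative
-- what changed: Replaces A's single pass with index-tracked early exits by building the full running-depth table in one sweep and then deciding with two reductions: last depth == 0 and minimum of the interior depths >= 1.
import Mathlib
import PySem

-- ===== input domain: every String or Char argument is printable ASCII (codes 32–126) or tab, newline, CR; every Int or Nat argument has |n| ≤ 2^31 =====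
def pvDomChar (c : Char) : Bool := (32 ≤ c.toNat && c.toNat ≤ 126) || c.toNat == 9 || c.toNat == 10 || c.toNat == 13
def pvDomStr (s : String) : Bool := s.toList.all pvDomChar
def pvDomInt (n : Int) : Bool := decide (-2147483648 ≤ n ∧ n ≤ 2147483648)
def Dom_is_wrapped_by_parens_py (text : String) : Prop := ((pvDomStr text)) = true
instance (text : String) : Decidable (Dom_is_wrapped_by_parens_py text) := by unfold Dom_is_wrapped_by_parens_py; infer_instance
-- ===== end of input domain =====

-- B replaces A's early-exit scan by a build-the-depth-table pass plus a last/min reduction (alternative decomposition, same O(n) cost).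


-- ===== PORT A =====
-- the for-loop over enumerate(text): chars, current idx, current depth, n = len(text)
def pvLoopA : List Char → Int → Int → Int → Bool
  | [], _, depth, _ => depth == 0
  | c :: rest, idx, depth, n =>
    if c = '(' then
      if depth + 1 = 0 ∧ idx < n - 1 then false else pvLoopA rest (idx + 1) (depth + 1) n
    else if c = ')' then
      if depth - 1 < 0 then false
      else if depth - 1 = 0 ∧ idx < n - 1 then false else pvLoopA rest (idx + 1) (depth - 1) n
    else
      if depth = 0 ∧ idx < n - 1 then false else pvLoopA rest (idx + 1) depth n

def is_wrapped_by_parens_py (text : String) : Bool :=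
  if PySem.Str.len text < 2 ∨ PySem.Str.pyGet? text 0 ≠ some '(' ∨ PySem.Str.pyGet? text (-1) ≠ some ')' then
    false
  else
    pvLoopA text.toList 0 0 (PySem.Str.len text)

-- ===== PORT B =====
-- one step of the depth update (the if/elif in Source B's loop)
def pvStep (d : Int) (c : Char) : Int :=
  if c = '(' then d + 1 else if c = ')' then d - 1 else d

def is_wrapped_by_parens_py_alt (text : String) : Bool :=
  if PySem.Str.len text < 2 ∨ PySem.Str.pyGet? text 0 ≠ some '(' ∨ PySem.Str.pyGet? text (-1) ≠ some ')' then
    false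
  else
    let depths := (text.toList.foldl (fun (st : List Int × Int) ch =>
      (st.1 ++ [pvStep st.2 ch], pvStep st.2 ch)) ([], 0)).1
    match PySem.List.pyGet? depths (-1) with
    | none => false       -- unreachable: the guard ensures len(text) ≥ 2, so depths ≠ []
    | some last =>
      last == 0 &&
        (match PySem.List.min? (PySem.List.slice depths none (some (-1))) (fun x => x) with
         | none => false  -- unreachable: depths[:-1] is nonempty under the guard
         | some m => decide (1 ≤ m))

-- ===== PRECONDITION & SPEC =====
def Spec_is_wrapped_by_parens_py (text : String) (out : Bool) : Prop := out = is_wrapped_by_parens_py_alt text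
instance (text : String) (out : Bool) : Decidable (Spec_is_wrapped_by_parens_py text out) := by unfold Spec_is_wrapped_by_parens_py; infer_instance

-- ===== CLAIM (what is proved, stated in full; the proofs are below) =====
def Claim_equal_is_wrapped_by_parens_py : Prop := ∀ (text : String), Dom_is_wrapped_by_parens_py text → Spec_is_wrapped_by_parens_py text (is_wrapped_by_parens_py text)

-- ===== LEMMAS AND PROOFS =====

lemma pvLoopA_cons (c : Char) (rest : List Char) (idx depth n : Int) :
    pvLoopA (c :: rest) idx depth n =
      (if c = '(' then
        if depth + 1 = 0 ∧ idx < n - 1 then false else pvLoopA rest (idx + 1) (depth + 1) n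
      else if c = ')' then
        if depth - 1 < 0 then false
        else if depth - 1 = 0 ∧ idx < n - 1 then false else pvLoopA rest (idx + 1) (depth - 1) n
      else
        if depth = 0 ∧ idx < n - 1 then false else pvLoopA rest (idx + 1) depth n) := rfl

/-- The running-depth table Source B builds: depth after each character, starting from `d`. -/
def pvDepths : List Char → Int → List Int
  | [], _ => []
  | c :: r, d => pvStep d c :: pvDepths r (pvStep d c)

lemma pvDepths_length (cs : List Char) (d : Int) : (pvDepths cs d).length = cs.length := by
  induction cs generalizing d with
  | nil => rfl
  | cons c r ih => simp [pvDepths, ih]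

lemma pvFoldl_eq (cs : List Char) (acc : List Int) (d : Int) :
    cs.foldl (fun (st : List Int × Int) ch => (st.1 ++ [pvStep st.2 ch], pvStep st.2 ch)) (acc, d)
      = (acc ++ pvDepths cs d, cs.foldl pvStep d) := by
  induction cs generalizing acc d with
  | nil => simp [pvDepths]
  | cons c r ih => simp [pvDepths, ih, List.foldl_cons]

lemma pvGetLast?_eq (l : List Int) (h : l ≠ []) : l.getLast? = some (l.getLastD 0) := by
  induction l with
  | nil => exact absurd rfl h
  | cons a t ih =>
    cases t with
    | nil => rfl
    | cons b ts => simp [List.getLastD]; simpa using ih (by simp)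

lemma pvMinCheck (ds : List Int) (h : ds ≠ []) :
    (match PySem.List.min? ds (fun x => x) with
     | none => false
     | some m => decide (1 ≤ m)) = ds.all (fun x => decide (1 ≤ x)) := by
  cases hm : PySem.List.min? ds (fun x => x) with
  | none => exact absurd ((PySem.List.min?_eq_none_iff ds _).1 hm) h
  | some m =>
    have hmem := PySem.List.min?_mem hm
    have hmin := PySem.List.min?_isMin hm
    by_cases h1 : 1 ≤ m
    · simp only [h1, decide_true]
      symm; simp only [List.all_eq_true, decide_eq_true_eq]
      intro y hy; have := hmin y hy; omega
    · simp only [h1, decide_false]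
      symm; simp only [List.all_eq_false]
      exact ⟨m, hmem, by simpa using h1⟩

/-- A's loop computes exactly B's last/min criterion on the depth table, for nonempty input
    and a nonnegative starting depth. -/
lemma pvKey (cs : List Char) (d idx n : Int) (hd : 0 ≤ d)
    (hn : idx + cs.length = n) (hne : cs ≠ []) :
    pvLoopA cs idx d n
      = (((pvDepths cs d).getLastD 0 == 0)
          && (pvDepths cs d).dropLast.all (fun x => decide (1 ≤ x))) := by
  induction cs generalizing d idx with
  | nil => exact absurd rfl hne
  | cons c rest ih =>
    cases rest with
    | nil =>
      have hidx : ¬ idx < n - 1 := by simp at hn; omega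
      by_cases hc : c = '('
      · simp [pvLoopA, pvDepths, pvStep, hc, hidx]
      · by_cases hc2 : c = ')'
        · by_cases hneg : d - 1 < 0
          · simp [pvLoopA, pvDepths, pvStep, hc2, hneg]; omega
          · simp [pvLoopA, pvDepths, pvStep, hc2, hidx, hneg]
        · simp [pvLoopA, pvDepths, pvStep, hc, hc2, hidx]
    | cons r rs =>
      have hidx : idx < n - 1 := by simp at hn; omega
      have hrne : (r :: rs : List Char) ≠ [] := by simp
      have hlen2 : ∀ d' : Int, pvDepths (r :: rs) d' ≠ [] := by
        intro d' h
        have := pvDepths_length (r :: rs) d'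
        rw [h] at this; simp at this
      have hdrop : ∀ (d' : Int), (d' :: pvDepths (r :: rs) d').dropLast
          = d' :: (pvDepths (r :: rs) d').dropLast :=
        fun d' => List.dropLast_cons_of_ne_nil (hlen2 d')
      have hlast : ∀ (d' : Int), (d' :: pvDepths (r :: rs) d').getLastD 0
          = (pvDepths (r :: rs) d').getLastD 0 := by
        intro d'
        cases h3 : pvDepths (r :: rs) d' with
        | nil => exact absurd h3 (hlen2 d')
        | cons a t => simp [List.getLastD]
      rw [show pvDepths (c :: r :: rs) d = pvStep d c :: pvDepths (r :: rs) (pvStep d c) from rfl,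
          hdrop, hlast, pvLoopA_cons, List.all_cons]
      by_cases hc : c = '('
      · have hstep : pvStep d c = d + 1 := by simp [pvStep, hc]
        rw [if_pos hc, if_neg (show ¬ (d + 1 = 0 ∧ idx < n - 1) from by omega), hstep,
            ih (d + 1) (idx + 1) (by omega) (by simp at hn ⊢; omega) hrne,
            show decide (1 ≤ d + 1) = true from by simp only [decide_eq_true_eq]; omega]
        simp
      · by_cases hc2 : c = ')'
        · have hstep : pvStep d c = d - 1 := by simp [pvStep, hc2]
          rw [if_neg hc, if_pos hc2, hstep]
          by_cases hneg : d - 1 < 0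
          · rw [if_pos hneg,
                show decide (1 ≤ d - 1) = false from by simp only [decide_eq_false_iff_not]; omega]
            simp
          · rw [if_neg hneg]
            by_cases hz : d - 1 = 0
            · rw [if_pos (show d - 1 = 0 ∧ idx < n - 1 from ⟨hz, hidx⟩),
                  show decide (1 ≤ d - 1) = false from by simp only [decide_eq_false_iff_not]; omega]
              simp
            · rw [if_neg (show ¬ (d - 1 = 0 ∧ idx < n - 1) from by omega),
                  ih (d - 1) (idx + 1) (by omega) (by simp at hn ⊢; omega) hrne,
                  show decide (1 ≤ d - 1) = true from by simp only [decide_eq_true_eq]; omega]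
              simp
        · have hstep : pvStep d c = d := by simp [pvStep, hc, hc2]
          rw [if_neg hc, if_neg hc2, hstep]
          by_cases hz : d = 0
          · rw [if_pos (show d = 0 ∧ idx < n - 1 from ⟨hz, hidx⟩),
                show decide (1 ≤ d) = false from by simp only [decide_eq_false_iff_not]; omega]
            simp
          · rw [if_neg (show ¬ (d = 0 ∧ idx < n - 1) from by omega),
                ih d (idx + 1) hd (by simp at hn ⊢; omega) hrne,
                show decide (1 ≤ d) = true from by simp only [decide_eq_true_eq]; omega]
            simp

-- ===== VERDICT (by name: the statement is the Claim_ definition above) =====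
theorem is_wrapped_by_parens_py_spec : Claim_equal_is_wrapped_by_parens_py := by
  intro text _
  unfold Spec_is_wrapped_by_parens_py is_wrapped_by_parens_py is_wrapped_by_parens_py_alt
  by_cases hg : PySem.Str.len text < 2 ∨ PySem.Str.pyGet? text 0 ≠ some '(' ∨ PySem.Str.pyGet? text (-1) ≠ some ')'
  · rw [if_pos hg, if_pos hg]
  · rw [if_neg hg, if_neg hg]
    push Not at hg
    have hlen : 2 ≤ text.toList.length := by
      have h1 := hg.1
      rw [show PySem.Str.len text = (text.toList.length : Int) from by simp [PySem.Str.len_eq]] at h1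
      omega
    have hne : text.toList ≠ [] := by intro h; rw [h] at hlen; simp at hlen
    rw [pvFoldl_eq text.toList [] 0]
    simp only [List.nil_append]
    have hdlen : (pvDepths text.toList 0).length = text.toList.length :=
      pvDepths_length _ _
    have hdne : pvDepths text.toList 0 ≠ [] := by
      intro h
      have h0 : text.toList.length = 0 := by rw [← hdlen, h]; rfl
      omega
    rw [PySem.List.pyGet?_neg_one, PySem.List.slice_to_neg_one]
    have hdropne : (pvDepths text.toList 0).dropLast ≠ [] := by
      intro h
      have h2 : (pvDepths text.toList 0).dropLast.length = 0 := by rw [h]; rfl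
      rw [List.length_dropLast] at h2
      omega
    rw [pvMinCheck _ hdropne, pvGetLast?_eq _ hdne]
    rw [pvKey text.toList 0 0 (PySem.Str.len text) le_rfl
        (by simp [PySem.Str.len_eq]) hne]
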